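-- pv_equiv track=rewrite | github.com/juhapekka/tira25 | allwords.py | create_words
-- ===== SOURCE A (Python) =====
-- def create_words(word):
--     rval = []
--     sana = []
--
--     n = len(word)
--     ww = {}
--     for c in word:
--         if c not in ww.keys():
--             ww[c] = 1
--         else:
--             ww[c] += 1
--
--
--     def valkkeri():
--         if len(sana) == len(word):
--             rval.append("".join(sana))
--             return
--
--         vika_c = sana[-1] if sana else None
--         for c in ww.keys():
--             if ww[c] > 0 and c != vika_c:
--                 ww[c] -= 1
--                 sana.append(c)
--                 valkkeri()
--                 sana.pop()
--                 ww[c] += 1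
--
--     valkkeri()
--     return sorted(rval)
-- ===== SOURCE B (Python) =====
-- def create_words(word):
--     letters = set(word)
--     prefixes = {""}
--     for _ in range(len(word)):
--         prefixes = {p + c for p in prefixes
--                     for c in letters
--                     if p.count(c) < word.count(c) and (not p or p[-1] != c)}
--     return sorted(prefixes)
-- ===== Notes on version B (the rewrite author's own statement) =====
-- stated objective: alternative
-- what changed: A prunes during a backtracking recursion over a mutable letter-count dict; B iterates level by level over a set of prefixes, extending every prefix by every still-available letter (availability recomputed with str.count) and deduplicating each frontier with a set comprehension, then sorts the final frontier.
import Mathlib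
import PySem

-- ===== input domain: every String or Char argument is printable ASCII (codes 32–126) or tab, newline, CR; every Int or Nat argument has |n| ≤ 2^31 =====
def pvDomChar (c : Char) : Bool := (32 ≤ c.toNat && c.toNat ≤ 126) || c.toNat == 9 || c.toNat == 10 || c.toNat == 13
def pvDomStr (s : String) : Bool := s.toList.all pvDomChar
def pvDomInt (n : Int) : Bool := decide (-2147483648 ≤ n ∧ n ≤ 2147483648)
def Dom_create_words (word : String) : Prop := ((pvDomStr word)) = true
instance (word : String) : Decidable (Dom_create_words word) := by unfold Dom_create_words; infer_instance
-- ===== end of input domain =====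

-- B replaces A's pruning backtracking recursion over a mutable letter-count dict by an
-- iterative level-by-level frontier of prefixes, set-deduplicated each round, sorted at the end
-- (objective: alternative algorithm; no speed claim).

-- ===== PORT A =====
-- the count dict: for c in word: if c not in ww.keys(): ww[c] = 1 else: ww[c] += 1
def pvCountA (cs : List Char) : PySem.Dict Char Int :=
  cs.foldl (fun d c => if d.contains c = false then d.insert c 1 else d.modify c 0 (· + 1))
    PySem.Dict.empty

-- valkkeri; the mutable (ww, sana, rval) state becomes parameters/the result, `fuel` is a
-- totality guard (every call has fuel = len(word) - len(sana), so the `| 0 => []` arm is unreachable)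
def pvValk (wlen : Nat) (fuel : Nat) (d : PySem.Dict Char Int) (sana : List Char) : List String :=
  if sana.length = wlen then [String.ofList sana]
  else
    match fuel with
    | 0 => []
    | f + 1 =>
      let vika : Option Char := sana.getLast?
      d.keys.foldl
        (fun acc c =>
          if 0 < d.getD c 0 ∧ vika ≠ some c then
            acc ++ pvValk wlen f (d.modify c 0 (· - 1)) (sana ++ [c])
          else acc) []

def create_words (word : String) : List String :=
  PySem.List.sorted
    (pvValk word.toList.length word.toList.length (pvCountA word.toList) []) (fun s => s) false

-- ===== PORT B =====
-- one pass of B's loop body: {p + c for p in prefixes for c in letters if ...};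
-- p.count(c) / word.count(c) with a 1-character needle is the character count — ported as
-- List.count on .toList (exact); `not p or p[-1] != c` is the disjunction below (exact)
def pvLevelStep (word : String) (prefixes : PySem.Set String) : PySem.Set String :=
  PySem.Set.ofList (prefixes.flatMap (fun p =>
    ((PySem.Set.ofList word.toList).filter (fun c =>
        decide (p.toList.count c < word.toList.count c) &&
        (decide (p.toList = []) || decide (p.toList.getLast? ≠ some c)))).map
      (fun c => p.push c)))

def create_words_alt (word : String) : List String :=
  PySem.List.sorted
    ((List.range word.toList.length).foldl (fun prefixes _ => pvLevelStep word prefixes)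
      (PySem.Set.ofList [""]))
    (fun s => s) false

-- ===== PRECONDITION & SPEC =====
def Spec_create_words (word : String) (out : List String) : Prop := out = create_words_alt word
instance (word : String) (out : List String) : Decidable (Spec_create_words word out) := by unfold Spec_create_words; infer_instance

-- ===== CLAIM (what is proved, stated in full; the proofs are below) =====
def Claim_equal_create_words : Prop := ∀ (word : String), Dom_create_words word → Spec_create_words word (create_words word)

-- ===== LEMMAS AND PROOFS =====

-- A's counting loop is collections.Counter
lemma pvCountA_step (d : PySem.Dict Char Int) (c : Char) :
    (if d.contains c = false then d.insert c 1 else d.modify c 0 (· + 1)) = d.modify c 0 (· + 1) := by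
  by_cases h : d.contains c = false
  · simp [h, PySem.Dict.modify, PySem.Dict.getD_of_not_contains _ _ h]
  · simp [h]

lemma pvCountA_eq_counter (cs : List Char) : pvCountA cs = PySem.Dict.counter cs := by
  unfold pvCountA
  rw [PySem.Dict.counter_eq_foldl]
  congr 1
  funext d c
  exact pvCountA_step d c

-- loop shape of valkkeri's for-loop: conditional append-accumulation is a flatMap
lemma pvFoldlIfAppend {α β : Type} (P : α → Prop) [DecidablePred P] (F : α → List β)
    (l : List α) (acc : List β) :
    l.foldl (fun acc c => if P c then acc ++ F c else acc) acc
      = acc ++ l.flatMap (fun c => if P c then F c else []) := by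
  have h : (fun (acc : List β) c => if P c then acc ++ F c else acc)
      = fun acc c => acc ++ (if P c then F c else []) := by
    funext a c; split <;> simp
  rw [h, PySem.List.foldl_append_eq_flatMap]

-- the backtracking invariant: with `rem` the multiset of letters still in the dict,
-- valkkeri emits exactly the duplicate-free list of sana ++ t, t an arrangement of rem
-- with no equal adjacent letters across sana ++ t
lemma pvValk_spec : ∀ (fuel wlen : Nat) (d : PySem.Dict Char Int) (sana rem : List Char),
    d.keys.Nodup →
    (∀ c, (rem.count c : Int) = d.getD c 0) →
    rem.length = fuel →
    sana.length + fuel = wlen →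
    List.IsChain (· ≠ ·) sana →
    (pvValk wlen fuel d sana).Nodup ∧
    (∀ s, s ∈ pvValk wlen fuel d sana ↔
      ∃ t : List Char, s = String.ofList (sana ++ t) ∧ (∀ c, t.count c = rem.count c) ∧
        List.IsChain (· ≠ ·) (sana ++ t)) := by
  intro fuel
  induction fuel with
  | zero =>
    intro wlen d sana rem hk hcnt hrl hlen hch
    have hrem : rem = [] := List.length_eq_zero_iff.mp hrl
    subst hrem
    have hif : sana.length = wlen := by omega
    unfold pvValk
    rw [if_pos hif]
    refine ⟨by simp, ?_⟩
    intro s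
    simp only [List.mem_singleton]
    constructor
    · intro hs
      exact ⟨[], by simpa using hs, by simp, by simpa using hch⟩
    · rintro ⟨t, hst, hc, -⟩
      have ht : t = [] := by
        rcases t with - | ⟨a, t'⟩
        · rfl
        · have := hc a; simp at this
      subst ht
      simpa using hst
  | succ f ih =>
    intro wlen d sana rem hk hcnt hrl hlen hch
    have hne : sana.length ≠ wlen := by omega
    unfold pvValk
    rw [if_neg hne]
    dsimp only
    rw [pvFoldlIfAppend, List.nil_append]
    -- the recursion for an admissible key c
    have hrec : ∀ c : Char, 0 < d.getD c 0 → sana.getLast? ≠ some c →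
        (pvValk wlen f (d.modify c 0 (· - 1)) (sana ++ [c])).Nodup ∧
        (∀ s, s ∈ pvValk wlen f (d.modify c 0 (· - 1)) (sana ++ [c]) ↔
          ∃ t, s = String.ofList ((sana ++ [c]) ++ t) ∧
            (∀ x, t.count x = (rem.erase c).count x) ∧
            List.IsChain (· ≠ ·) ((sana ++ [c]) ++ t)) := by
      intro c hpos hvika
      have h1 : (0 : Int) < (rem.count c : Int) := by rw [hcnt c]; exact hpos
      have h1n : 0 < rem.count c := by exact_mod_cast h1
      have hcrem : c ∈ rem := List.count_pos_iff.mp h1n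
      have hcontains : d.contains c = true := by
        by_contra hcc
        rw [Bool.not_eq_true] at hcc
        rw [PySem.Dict.getD_of_not_contains _ _ hcc] at hpos
        exact lt_irrefl 0 hpos
      apply ih
      · rw [PySem.Dict.keys_modify, PySem.Dict.keys_insert_of_contains _ _ hcontains]
        exact hk
      · intro x
        rw [PySem.Dict.getD_modify, List.count_erase]
        by_cases hx : x = c
        · subst hx
          rw [if_pos rfl]
          simp only [BEq.rfl, if_true]
          rw [Nat.cast_sub h1n, hcnt x]
          norm_num
        · rw [if_neg hx]
          have hbe : (c == x) = false := by
            simpa using fun h => hx h.symm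
          simp only [hbe]
          exact hcnt x
      · rw [List.length_erase_of_mem hcrem, hrl]; omega
      · simp only [List.length_append, List.length_singleton]; omega
      · rw [List.isChain_append]
        refine ⟨hch, by simp, ?_⟩
        intro x hx y hy
        simp only [List.head?_cons, Option.mem_def, Option.some.injEq] at hy
        subst hy
        intro hxy
        apply hvika
        rw [← hxy]
        exact hx
    constructor
    · -- Nodup of the flatMap
      rw [List.nodup_flatMap]
      constructor
      · intro c hc
        split
        · next hcond => exact (hrec c hcond.1 hcond.2).1
        · exact List.nodup_nil
      · apply hk.imp
        intro a b hab s hsa hsb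
        beta_reduce at hsa hsb
        split at hsa
        · next hconda =>
          split at hsb
          · next hcondb =>
            obtain ⟨t, hst, -, -⟩ := ((hrec a hconda.1 hconda.2).2 s).mp hsa
            obtain ⟨t', hst', -, -⟩ := ((hrec b hcondb.1 hcondb.2).2 s).mp hsb
            apply hab
            have : (sana ++ [a]) ++ t = (sana ++ [b]) ++ t' := by
              have h2 := congrArg String.toList (hst ▸ hst')
              simpa using h2
            simp only [List.append_assoc, List.singleton_append] at this
            exact (List.cons.injEq _ _ _ _).mp (List.append_cancel_left this) |>.1
          · simp at hsb
        · simp at hsa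
    · -- membership
      intro s
      rw [List.mem_flatMap]
      constructor
      · rintro ⟨c, hcmem, hs⟩
        split at hs
        · next hcond =>
          obtain ⟨hpos, hvika⟩ := hcond
          have h1 : (0 : Int) < (rem.count c : Int) := by rw [hcnt c]; exact hpos
          have h1n : 0 < rem.count c := by exact_mod_cast h1
          obtain ⟨t, hst, hcount, hchain⟩ := ((hrec c hpos hvika).2 s).mp hs
          refine ⟨c :: t, by simpa using hst, ?_, by simpa using hchain⟩
          intro x
          rw [List.count_cons, hcount x, List.count_erase]
          by_cases hx : c = x
          · subst hx
            simp only [BEq.rfl, if_true]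
            omega
          · have hbe : (c == x) = false := by simpa using hx
            simp [hbe]
        · simp at hs
      · rintro ⟨t, hst, hcnt_t, hchain_t⟩
        rcases t with - | ⟨c, t'⟩
        · exfalso
          have : rem = [] := by
            apply List.eq_nil_iff_forall_not_mem.mpr
            intro a ha
            have := hcnt_t a
            simp only [List.count_nil] at this
            have := List.count_pos_iff.mpr ha
            omega
          rw [this] at hrl
          simp at hrl
        · have hcm : 0 < rem.count c := by
            have := hcnt_t c
            simp only [List.count_cons, BEq.rfl, if_true] at this
            omega
          have hpos : 0 < d.getD c 0 := by
            rw [← hcnt c]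
            exact_mod_cast hcm
          have hcontains : d.contains c = true := by
            by_contra hcc
            rw [Bool.not_eq_true] at hcc
            rw [PySem.Dict.getD_of_not_contains _ _ hcc] at hpos
            exact lt_irrefl 0 hpos
          have hvika : sana.getLast? ≠ some c := by
            intro hlast
            have hc2 := (List.isChain_append.mp hchain_t).2.2
            exact hc2 c hlast c (by simp) rfl
          refine ⟨c, (PySem.Dict.contains_iff_mem_keys d c).mp hcontains, ?_⟩
          rw [if_pos ⟨hpos, hvika⟩]
          apply ((hrec c hpos hvika).2 s).mpr
          refine ⟨t', by simpa using hst, ?_, by simpa using hchain_t⟩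
          intro x
          rw [List.count_erase]
          have := hcnt_t x
          rw [List.count_cons] at this
          by_cases hx : c = x
          · subst hx
            simp only [BEq.rfl, if_true] at this ⊢
            omega
          · have hbe : (c == x) = false := by simpa using hx
            simp only [hbe] at this ⊢
            omega

-- B's frontier invariant: after k rounds, `prefixes` holds (without duplicates) exactly the
-- length-k strings whose letter counts stay within word's and with no equal adjacent letters
lemma pvLevel_spec (word : String) : ∀ k : Nat,
    ((List.range k).foldl (fun pref _ => pvLevelStep word pref) (PySem.Set.ofList [""])).Nodup ∧
    (∀ s, s ∈ (List.range k).foldl (fun pref _ => pvLevelStep word pref) (PySem.Set.ofList [""]) ↔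
      (s.toList.length = k ∧ (∀ c, s.toList.count c ≤ word.toList.count c) ∧
        List.IsChain (· ≠ ·) s.toList)) := by
  intro k
  induction k with
  | zero =>
    simp only [List.range_zero, List.foldl_nil]
    refine ⟨PySem.Set.nodup_ofList _, ?_⟩
    intro s
    rw [PySem.Set.mem_ofList]
    constructor
    · intro hs
      have hs' : s = "" := by simpa using hs
      subst hs'
      simp
    · rintro ⟨hlen, -, -⟩
      have h0 : s.toList = [] := List.length_eq_zero_iff.mp hlen
      have hs' : s = "" := String.toList_eq_nil_iff.mp h0
      subst hs'
      simp
  | succ k ih =>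
    obtain ⟨ihn, ihm⟩ := ih
    simp only [List.range_succ, List.foldl_append, List.foldl_cons, List.foldl_nil]
    constructor
    · rw [pvLevelStep]
      exact PySem.Set.nodup_ofList _
    intro s
    rw [pvLevelStep, PySem.Set.mem_ofList, List.mem_flatMap]
    constructor
    · rintro ⟨p, hp, hs⟩
      rw [List.mem_map] at hs
      obtain ⟨c, hc, rfl⟩ := hs
      rw [List.mem_filter] at hc
      obtain ⟨-, hcond⟩ := hc
      obtain ⟨hplen, hpcnt, hpch⟩ := (ihm p).mp hp
      simp only [Bool.and_eq_true, Bool.or_eq_true, decide_eq_true_eq] at hcond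
      obtain ⟨hlt, hlast⟩ := hcond
      refine ⟨?_, ?_, ?_⟩
      · rw [String.toList_push]
        simp [hplen]
      · intro x
        rw [String.toList_push, List.count_append]
        have h1 := hpcnt x
        by_cases hx : x = c
        · subst hx
          simp
          omega
        · have h0 : List.count x [c] = 0 := List.count_eq_zero.mpr (by simp [hx])
          omega
      · rw [String.toList_push, List.isChain_append]
        refine ⟨hpch, by simp, ?_⟩
        intro x hx y hy
        simp only [List.head?_cons, Option.mem_def, Option.some.injEq] at hy
        subst hy
        rcases hlast with hnil | hne
        · rw [hnil] at hx
          simp at hx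
        · intro hxy
          apply hne
          rw [← hxy]
          exact hx
    · rintro ⟨hlen, hcnt2, hch⟩
      have hne : s.toList ≠ [] := by
        intro h
        rw [h] at hlen
        simp at hlen
      obtain ⟨q, c, hqc⟩ : ∃ q c, s.toList = q ++ [c] :=
        ⟨s.toList.dropLast, s.toList.getLast hne, (List.dropLast_append_getLast hne).symm⟩
      have hchq : List.IsChain (· ≠ ·) (q ++ [c]) := hqc ▸ hch
      have hcntq : ∀ x, (q ++ [c]).count x ≤ word.toList.count x := fun x => hqc ▸ hcnt2 x
      have hlenq : (q ++ [c]).length = k + 1 := by rw [← hqc]; exact hlen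
      refine ⟨String.ofList q, ?_, ?_⟩
      · apply (ihm _).mpr
        rw [String.toList_ofList]
        refine ⟨?_, ?_, ?_⟩
        · have h4 := hlenq
          simp at h4
          omega
        · intro x
          have h5 := hcntq x
          rw [List.count_append] at h5
          omega
        · exact (List.isChain_append.mp hchq).1
      · rw [List.mem_map]
        refine ⟨c, ?_, ?_⟩
        · rw [List.mem_filter]
          refine ⟨?_, ?_⟩
          · rw [PySem.Set.mem_ofList]
            apply List.count_pos_iff.mp
            refine lt_of_lt_of_le ?_ (hcntq c)
            rw [List.count_append]
            simp
          · simp only [Bool.and_eq_true, Bool.or_eq_true, decide_eq_true_eq, String.toList_ofList]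
            refine ⟨?_, ?_⟩
            · have h6 := hcntq c
              rw [List.count_append] at h6
              simp at h6
              omega
            · by_cases hq : q = []
              · exact Or.inl hq
              · refine Or.inr ?_
                intro h
                exact (List.isChain_append.mp hchq).2.2 _ h _ (by simp) rfl
        · have h3 : ((String.ofList q).push c).toList = s.toList := by
            rw [String.toList_push, String.toList_ofList, hqc]
          rw [← String.ofList_toList (s := (String.ofList q).push c), h3, String.ofList_toList]

-- ===== VERDICT (by name: the statement is the Claim_ definition above) =====
theorem create_words_spec : Claim_equal_create_words := by
  intro word _
  unfold Spec_create_words create_words create_words_alt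
  have hA := pvValk_spec word.toList.length word.toList.length (pvCountA word.toList) []
    word.toList
    (by rw [pvCountA_eq_counter]; exact PySem.Dict.nodup_keys_counter word.toList)
    (by intro c; rw [pvCountA_eq_counter]; exact (PySem.Dict.getD_counter word.toList c).symm)
    rfl (by simp) (by simp)
  obtain ⟨hAnodup, hAmem⟩ := hA
  have hBnodup :
      ((List.range word.toList.length).foldl (fun prefixes _ => pvLevelStep word prefixes)
        (PySem.Set.ofList [""])).Nodup := (pvLevel_spec word word.toList.length).1
  have hBmem : ∀ s, s ∈ (List.range word.toList.length).foldl
        (fun prefixes _ => pvLevelStep word prefixes) (PySem.Set.ofList [""]) ↔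
      s.toList.Perm word.toList ∧ List.IsChain (· ≠ ·) s.toList := by
    intro s
    rw [(pvLevel_spec word word.toList.length).2 s]
    constructor
    · rintro ⟨hlen, hcnt2, hch⟩
      refine ⟨?_, hch⟩
      have hm : (s.toList : Multiset Char) ≤ (word.toList : Multiset Char) := by
        rw [Multiset.le_iff_count]
        intro a
        simpa using hcnt2 a
      have heq := Multiset.eq_of_le_of_card_le hm (by simpa using le_of_eq hlen.symm)
      exact Multiset.coe_eq_coe.mp heq
    · rintro ⟨hperm, hch⟩
      exact ⟨hperm.length_eq, fun c => le_of_eq (List.perm_iff_count.mp hperm c), hch⟩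
  have hAmem' : ∀ s, s ∈ pvValk word.toList.length word.toList.length (pvCountA word.toList) [] ↔
      s.toList.Perm word.toList ∧ List.IsChain (· ≠ ·) s.toList := by
    intro s
    rw [hAmem s]
    constructor
    · rintro ⟨t, rfl, hc, hch⟩
      rw [String.toList_ofList]
      simp only [List.nil_append] at hch ⊢
      exact ⟨List.perm_iff_count.mpr hc, hch⟩
    · rintro ⟨hperm, hchain⟩
      exact ⟨s.toList, by simp [String.ofList_toList],
        fun c => List.perm_iff_count.mp hperm c, by simpa using hchain⟩
  apply PySem.List.sorted_eq_sorted_of_perm _ _ _ (fun a b h => h)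
  rw [List.perm_ext_iff_of_nodup hAnodup hBnodup]
  intro s
  rw [hAmem' s, hBmem s]
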